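-- pv_equiv track=rewrite | github.com/seanpourgoutzidis/Mati | Mati.py | constructSubQuery
-- ===== SOURCE A (Python) =====
-- def constructSubQuery (objectsDetected, objectFrequency):
--
--     """
--     This function formats the objects detected into a subquery which is then used by other functions
--     """
--
--     query = ""
--
--     iteration = 0
--
--     #Iterate through the objects detected
--     for item in objectsDetected:
--
--         #By default, set the subquery to the item in question
--         subQuery = item
--
--         #If there's multiple of the item
--         if (objectFrequency[item] > 1):
--             subQuery = "multiple " + item + "s"
--
--         else:
--             subQuery = "a " + item
--
--         #Formatting the subquery
--         if(iteration == len(objectsDetected) - 1):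
--             subQuery = subQuery + "."
--
--         elif (iteration == len(objectsDetected) - 2):
--             subQuery = subQuery + ", and "
--
--         else:
--             subQuery = subQuery + ", "
--
--         #Append subquery to the end of the original query
--         query = query + subQuery
--
--         iteration = iteration + 1
--
--     return query
-- ===== SOURCE B (Python) =====
-- def constructSubQuery(objectsDetected, objectFrequency):
--     phrases = ["multiple " + item + "s" if objectFrequency[item] > 1 else "a " + item
--                for item in objectsDetected]
--     if not phrases:
--         return ""
--     if len(phrases) == 1:
--         return phrases[0] + "."
--     return ", ".join(phrases[:-1]) + ", and " + phrases[-1] + "."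
-- ===== Notes on version B (the rewrite author's own statement) =====
-- stated objective: simpler
-- what changed: A interleaves punctuation decisions into the building loop via a positional iteration counter compared against len-1/len-2; B first maps each item to its phrase ('a X' / 'multiple Xs') and then assembles the sentence by joining all-but-last with ', ', adding ', and ' plus the last phrase and the final period, with explicit empty and singleton cases.
import Mathlib
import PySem

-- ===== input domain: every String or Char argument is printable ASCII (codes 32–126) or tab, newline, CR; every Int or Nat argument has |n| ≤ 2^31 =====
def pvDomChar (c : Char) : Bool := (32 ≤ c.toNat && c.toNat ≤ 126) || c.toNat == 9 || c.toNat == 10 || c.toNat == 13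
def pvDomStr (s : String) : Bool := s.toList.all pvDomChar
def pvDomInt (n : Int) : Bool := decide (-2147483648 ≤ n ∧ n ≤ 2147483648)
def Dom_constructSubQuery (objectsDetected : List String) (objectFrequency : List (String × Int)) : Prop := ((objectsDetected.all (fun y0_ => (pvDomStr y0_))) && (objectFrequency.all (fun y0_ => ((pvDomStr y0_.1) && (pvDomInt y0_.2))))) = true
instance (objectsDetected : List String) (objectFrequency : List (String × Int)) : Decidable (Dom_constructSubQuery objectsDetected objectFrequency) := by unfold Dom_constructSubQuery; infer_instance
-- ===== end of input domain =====

-- B replaces A's per-iteration positional punctuation branches with a phrase list and a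
-- join-based assembly (objective: simpler); return value only, no mutation involved.

-- ===== PORT A =====
-- dict lookup objectFrequency[item]: first match in the association list; the default 0 is
-- never reached under Pre_ (Python raises KeyError there, excluded below)
def pvLookup (d : List (String × Int)) (k : String) : Int :=
  match d.find? (fun p => p.1 == k) with
  | some p => p.2
  | none => 0

def pvGoA (objectFrequency : List (String × Int)) (n : Int) :
    String → Int → List String → String
  | query, _, [] => query
  | query, iteration, item :: rest =>
      let subQuery := if pvLookup objectFrequency item > 1
        then "multiple " ++ item ++ "s"
        else "a " ++ item
      let subQuery := if iteration == n - 1 then subQuery ++ "."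
        else if iteration == n - 2 then subQuery ++ ", and "
        else subQuery ++ ", "
      pvGoA objectFrequency n (query ++ subQuery) (iteration + 1) rest

def constructSubQuery (objectsDetected : List String) (objectFrequency : List (String × Int)) : String :=
  pvGoA objectFrequency (objectsDetected.length : Int) "" 0 objectsDetected

-- ===== PORT B =====
def pvPhrase (objectFrequency : List (String × Int)) (item : String) : String :=
  if pvLookup objectFrequency item > 1 then "multiple " ++ item ++ "s" else "a " ++ item

-- hand port of str.join (exact: sep between consecutive parts)
def pvJoin (sep : String) : List String → String
  | [] => ""
  | [p] => p
  | p :: q :: rest => p ++ sep ++ pvJoin sep (q :: rest)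

def constructSubQuery_alt (objectsDetected : List String) (objectFrequency : List (String × Int)) : String :=
  let phrases := objectsDetected.map (pvPhrase objectFrequency)
  match phrases with
  | [] => ""
  | [p] => p ++ "."
  | p :: q :: rest =>
      pvJoin ", " ((p :: q :: rest).dropLast) ++ ", and "
        ++ PySem.List.pyGetD (p :: q :: rest) (-1) "" ++ "."

-- ===== PRECONDITION & SPEC =====
-- Pre_ excludes exactly the inputs where Python A (and B alike) raises KeyError:
-- a detected object missing from the frequency dict.
def Pre_constructSubQuery (objectsDetected : List String) (objectFrequency : List (String × Int)) : Prop :=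
  ∀ x ∈ objectsDetected, x ∈ objectFrequency.map Prod.fst
instance (objectsDetected : List String) (objectFrequency : List (String × Int)) : Decidable (Pre_constructSubQuery objectsDetected objectFrequency) := by unfold Pre_constructSubQuery; infer_instance

def pvWitness_constructSubQuery : List String × (List (String × Int)) :=
  (["cat", "dog", "cup"], [("cat", 2), ("dog", 1), ("cup", 1)])

def Spec_constructSubQuery (objectsDetected : List String) (objectFrequency : List (String × Int)) (out : String) : Prop := out = constructSubQuery_alt objectsDetected objectFrequency
instance (objectsDetected : List String) (objectFrequency : List (String × Int)) (out : String) : Decidable (Spec_constructSubQuery objectsDetected objectFrequency out) := by unfold Spec_constructSubQuery; infer_instance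

-- ===== CLAIM (what is proved, stated in full; the proofs are below) =====
def Claim_equal_constructSubQuery : Prop := ∀ (objectsDetected : List String) (objectFrequency : List (String × Int)), Dom_constructSubQuery objectsDetected objectFrequency → Pre_constructSubQuery objectsDetected objectFrequency → Spec_constructSubQuery objectsDetected objectFrequency (constructSubQuery objectsDetected objectFrequency)

-- ===== LEMMAS AND PROOFS =====

-- canonical assembly of a phrase list, mediating between the two ports
def pvC : List String → String
  | [] => ""
  | [p] => p ++ "."
  | [p, q] => p ++ ", and " ++ q ++ "."
  | p :: q :: r :: rest => p ++ ", " ++ pvC (q :: r :: rest)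

theorem pvGoA_cons (freq : List (String × Int)) (n : Int) (q : String) (i : Int)
    (x : String) (rest : List String) :
    pvGoA freq n q i (x :: rest) =
      pvGoA freq n
        (q ++ (let s := if pvLookup freq x > 1 then "multiple " ++ x ++ "s" else "a " ++ x
               if i == n - 1 then s ++ "." else if i == n - 2 then s ++ ", and " else s ++ ", "))
        (i + 1) rest := rfl

theorem pvGoA_eq_pvC (freq : List (String × Int)) (n : Int) :
    ∀ (xs : List String) (q : String) (i : Int), i + (xs.length : Int) = n →
      pvGoA freq n q i xs = q ++ pvC (xs.map (pvPhrase freq)) := by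
  intro xs
  induction xs with
  | nil => intro q i _; simp [pvGoA, pvC]
  | cons x rest ih =>
    intro q i hn
    simp only [List.length_cons] at hn
    rw [pvGoA_cons, ih _ (i + 1) (by push_cast at hn ⊢; omega)]
    match rest with
    | [] =>
      have h1 : (i == n - 1) = true := by
        rw [beq_iff_eq]; simp at hn; omega
      simp [h1, pvC, pvPhrase, String.append_assoc]
    | [y] =>
      have h1 : (i == n - 1) = false := by
        rw [beq_eq_false_iff_ne]; simp at hn; omega
      have h2 : (i == n - 2) = true := by
        rw [beq_iff_eq]; simp at hn; omega
      simp [h1, h2, pvC, pvPhrase, String.append_assoc]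
    | y :: z :: rs =>
      have h1 : (i == n - 1) = false := by
        rw [beq_eq_false_iff_ne]; simp at hn; omega
      have h2 : (i == n - 2) = false := by
        rw [beq_eq_false_iff_ne]; simp at hn; omega
      simp [h1, h2, pvC, pvPhrase, String.append_assoc]

theorem pvGetLast_cons_cons (p q : String) (rs : List String) :
    PySem.List.pyGetD (p :: q :: rs) (-1) "" = PySem.List.pyGetD (q :: rs) (-1) "" := by
  simp [PySem.List.pyGetD, PySem.List.pyGet?, PySem.List.pyIdx?]
  rfl

theorem pvJoin_assembly : ∀ (rest : List String) (p q : String),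
    pvJoin ", " ((p :: q :: rest).dropLast) ++ ", and "
      ++ PySem.List.pyGetD (p :: q :: rest) (-1) "" ++ "."
    = pvC (p :: q :: rest) := by
  intro rest
  induction rest with
  | nil =>
    intro p q
    simp [pvJoin, pvC, PySem.List.pyGetD, PySem.List.pyGet?, PySem.List.pyIdx?,
      String.append_assoc]
  | cons r rs ih =>
    intro p q
    have hd : (p :: q :: r :: rs).dropLast = p :: (q :: r :: rs).dropLast := rfl
    have hj : pvJoin ", " (p :: (q :: r :: rs).dropLast)
        = p ++ ", " ++ pvJoin ", " ((q :: r :: rs).dropLast) := by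
      cases h : (q :: r :: rs).dropLast with
      | nil => simp [List.dropLast] at h
      | cons a l => simp [pvJoin]
    rw [hd, hj, pvGetLast_cons_cons]
    rw [show pvC (p :: q :: r :: rs) = p ++ ", " ++ pvC (q :: r :: rs) from rfl, ← ih q r]
    simp [String.append_assoc]

theorem alt_eq_pvC (objectsDetected : List String) (objectFrequency : List (String × Int)) :
    constructSubQuery_alt objectsDetected objectFrequency
      = pvC (objectsDetected.map (pvPhrase objectFrequency)) := by
  unfold constructSubQuery_alt
  match objectsDetected with
  | [] => rfl
  | [x] => rfl
  | x :: y :: rest =>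
    simp only [List.map]
    exact pvJoin_assembly _ _ _

-- ===== VERDICT (by name: the statement is the Claim_ definition above) =====
theorem constructSubQuery_spec : Claim_equal_constructSubQuery := by
  intro objectsDetected objectFrequency _ _
  unfold Spec_constructSubQuery constructSubQuery
  rw [alt_eq_pvC, pvGoA_eq_pvC objectFrequency _ objectsDetected "" 0 (by simp)]
  simp
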